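-- pv_equiv track=rewrite | github.com/gildasmorvan/pyxai | sources/core/tools/vizualisation.py | convert_features_to_dict_features
-- ===== SOURCE A (Python) =====
-- def convert_features_to_dict_features(features):
--     dict_features = dict()
--     for feature in features:
--         name = feature["name"]
--         if name not in dict_features.keys():
--             dict_features[name] = [feature]
--         else:
--             dict_features[name].append(feature)
--     return dict_features
-- ===== SOURCE B (Python) =====
-- def convert_features_to_dict_features(features):
--     names = list(dict.fromkeys(f["name"] for f in features))
--     return {name: [f for f in features if f["name"] == name] for name in names}
-- ===== Notes on version B (the rewrite author's own statement) =====
-- stated objective: simpler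
-- what changed: Replaces the single accumulating insert-or-append dict pass with a first-appearance name index (dict.fromkeys) followed by a per-name filtering dict comprehension.
import Mathlib
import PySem

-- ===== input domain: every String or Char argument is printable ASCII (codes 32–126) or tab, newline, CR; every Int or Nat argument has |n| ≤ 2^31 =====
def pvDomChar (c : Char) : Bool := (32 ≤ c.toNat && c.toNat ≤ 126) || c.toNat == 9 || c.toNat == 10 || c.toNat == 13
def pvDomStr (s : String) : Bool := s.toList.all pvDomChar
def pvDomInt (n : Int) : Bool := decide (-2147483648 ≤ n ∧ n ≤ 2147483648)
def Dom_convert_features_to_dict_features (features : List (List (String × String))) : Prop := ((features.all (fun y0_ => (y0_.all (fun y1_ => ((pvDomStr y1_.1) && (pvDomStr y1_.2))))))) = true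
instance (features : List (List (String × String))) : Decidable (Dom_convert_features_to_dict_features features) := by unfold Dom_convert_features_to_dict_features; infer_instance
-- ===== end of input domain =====

-- B groups features by building the first-appearance name index, then one filtering
-- pass per name (simpler decomposition; not claimed faster).


-- feature["name"]: a feature is a Python dict, so lookup follows dict(pairs) semantics
-- (later duplicate key wins); exact under Pre_, which guarantees the key is present.
def pvFeatName (feature : List (String × String)) : String :=
  (PySem.Dict.ofList feature).getD "name" ""

-- ===== PORT A =====
def convert_features_to_dict_features (features : List (List (String × String))) : List (String × List (List (String × String))) :=
  (features.foldl (fun dict_features feature =>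
      let name := pvFeatName feature
      if dict_features.contains name = false then dict_features.insert name [feature]
      else dict_features.modify name [] (fun v => v ++ [feature]))
    PySem.Dict.empty).items

-- ===== PORT B =====
def convert_features_to_dict_features_alt (features : List (List (String × String))) : List (String × List (List (String × String))) :=
  let names := PySem.List.dedup (features.map (fun f => pvFeatName f))
  names.map (fun name => (name, features.filter (fun f => pvFeatName f == name)))

-- ===== PRECONDITION & SPEC =====
-- A raises KeyError on any feature lacking the key "name"; exactly those inputs are excluded.
def Pre_convert_features_to_dict_features (features : List (List (String × String))) : Prop :=
  ∀ f ∈ features, (PySem.Dict.ofList f).contains "name" = true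
instance (features : List (List (String × String))) : Decidable (Pre_convert_features_to_dict_features features) := by unfold Pre_convert_features_to_dict_features; infer_instance
def pvWitness_convert_features_to_dict_features : (List (List (String × String))) :=
  [[("name", "a"), ("v", "1")], [("name", "b")], [("name", "a"), ("v", "2")]]

def Spec_convert_features_to_dict_features (features : List (List (String × String))) (out : List (String × List (List (String × String)))) : Prop := out = convert_features_to_dict_features_alt features
instance (features : List (List (String × String))) (out : List (String × List (List (String × String)))) : Decidable (Spec_convert_features_to_dict_features features out) := by unfold Spec_convert_features_to_dict_features; infer_instance

-- ===== CLAIM (what is proved, stated in full; the proofs are below) =====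
def Claim_equal_convert_features_to_dict_features : Prop := ∀ (features : List (List (String × String))), Dom_convert_features_to_dict_features features → Pre_convert_features_to_dict_features features → Spec_convert_features_to_dict_features features (convert_features_to_dict_features features)

-- ===== LEMMAS AND PROOFS =====

-- A's insert-or-append branch is, in either case, one modify-append at the feature's name.
theorem pvStep_eq (d : PySem.Dict String (List (List (String × String)))) (f : List (String × String)) :
    (if d.contains (pvFeatName f) = false then d.insert (pvFeatName f) [f]
     else d.modify (pvFeatName f) [] (fun v => v ++ [f]))
    = d.modify (pvFeatName f) [] (fun v => v ++ [f]) := by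
  by_cases h : d.contains (pvFeatName f) = false
  · simp [h, PySem.Dict.insert, PySem.Dict.modify, PySem.Dict.getD_of_not_contains d [] h]
  · simp [h]

theorem convert_A_eq (features : List (List (String × String))) :
    convert_features_to_dict_features features
      = (features.foldl (fun d f => d.modify (pvFeatName f) [] (fun v => v ++ [f]))
          PySem.Dict.empty).items := by
  unfold convert_features_to_dict_features
  have h : (fun (dict_features : PySem.Dict String (List (List (String × String))))
      (feature : List (String × String)) =>
      let name := pvFeatName feature
      if dict_features.contains name = false then dict_features.insert name [feature]
      else dict_features.modify name [] (fun v => v ++ [feature]))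
      = fun d f => d.modify (pvFeatName f) [] (fun v => v ++ [f]) :=
    funext fun d => funext fun f => pvStep_eq d f
  rw [h]

theorem convert_features_to_dict_features_spec : Claim_equal_convert_features_to_dict_features := by
  intro features _ _
  unfold Spec_convert_features_to_dict_features
  rw [convert_A_eq]
  set D := features.foldl (fun d f => d.modify (pvFeatName f) [] (fun v => v ++ [f]))
      PySem.Dict.empty with hD
  have hkeys : D.keys = PySem.Set.ofList (features.map (fun f => pvFeatName f)) := by
    rw [hD, PySem.Dict.keys_foldl_modify_key features (fun f => pvFeatName f) []
      (fun _ f => (fun v => v ++ [f]))]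
    rfl
  have hnodup : D.keys.Nodup := by
    rw [hD]
    exact PySem.Dict.nodup_keys_foldl_modify_key features (fun f => pvFeatName f) []
      (fun _ f => (fun v => v ++ [f])) PySem.Dict.empty (by simp [PySem.Dict.keys_empty])
  have hgetD : ∀ c, D.getD c [] = features.filter (fun f => pvFeatName f == c) := by
    intro c
    have h := PySem.Dict.getD_foldl_modify_append
      (features.map (fun f => (pvFeatName f, f))) PySem.Dict.empty c
    rw [List.foldl_map] at h
    rw [hD]
    simp only [List.filter_map, List.map_map, Function.comp_def] at h
    simpa using h
  rw [PySem.Dict.items_eq_map_keys D hnodup [], hkeys]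
  unfold convert_features_to_dict_features_alt
  rw [PySem.List.dedup_eq_ofList]
  exact List.map_congr_left (fun k _ => by rw [hgetD k])
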